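-- pv_equiv track=rewrite | github.com/korntech/hacker_rank_chronicles | gameofThrones.py | gameOfThrones
-- ===== SOURCE A (Python) =====
-- from collections import defaultdict
--
-- def gameOfThrones(s):
--     # Write your code here
--     count = defaultdict(int)
--
--     for char in s:
--         count[char] += 1
--
--     even = [num for num in count.values() if not num % 2 ]
--     odd = [num for num in count.values() if num % 2 ]
--
--     if len(s) % 2:
--         if len(odd) != 1 and even:
--             return 'NO'
--         else:
--             return 'YES'
--     else:
--         if not odd and even:
--             return 'YES'
--         # check if all values but 1 are even when counting them
--     return 'NO'
-- ===== SOURCE B (Python) =====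
-- def gameOfThrones(s):
--     t = sorted(s)
--     counts = []
--     i, n = 0, len(t)
--     while i < n:
--         j = i + 1
--         while j < n and t[j] == t[i]:
--             j += 1
--         counts.append(j - i)
--         i = j
--     even = [c for c in counts if c % 2 == 0]
--     odd = [c for c in counts if c % 2 != 0]
--     if len(s) % 2:
--         return 'YES' if len(odd) == 1 or not even else 'NO'
--     return 'YES' if not odd and even else 'NO'
-- ===== Notes on version B (the rewrite author's own statement) =====
-- stated objective: alternative
-- what changed: B produces the per-character counts by sorting the string and run-length scanning it with two index loops instead of incrementally filling a defaultdict histogram, and folds the same branch decisions into conditional expressions.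
import Mathlib
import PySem

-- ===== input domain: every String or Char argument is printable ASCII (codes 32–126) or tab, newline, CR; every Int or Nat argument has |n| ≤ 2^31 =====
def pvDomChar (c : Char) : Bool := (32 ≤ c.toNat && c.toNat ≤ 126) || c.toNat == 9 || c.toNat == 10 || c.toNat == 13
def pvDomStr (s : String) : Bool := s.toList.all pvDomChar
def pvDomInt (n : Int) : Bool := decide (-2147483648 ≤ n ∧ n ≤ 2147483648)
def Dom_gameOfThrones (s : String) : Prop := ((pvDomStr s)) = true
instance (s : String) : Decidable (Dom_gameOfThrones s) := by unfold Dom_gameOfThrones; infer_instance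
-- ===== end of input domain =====

-- B builds the character counts by sorting the string and run-length scanning it instead of
-- filling a defaultdict histogram; the decision logic (A's corner behaviour included) is kept
-- value-for-value. Alternative algorithm, not claimed faster.

-- ===== PORT A =====
def gameOfThrones (s : String) : String :=
  -- count = defaultdict(int); for char in s: count[char] += 1
  let count : PySem.Dict Char Int :=
    s.toList.foldl (fun d ch => d.modify ch 0 (· + 1)) PySem.Dict.empty
  let even := count.values.filter (fun num => PySem.Int.mod num 2 == 0)
  let odd  := count.values.filter (fun num => PySem.Int.mod num 2 != 0)
  if PySem.Str.len s % 2 ≠ 0 then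
    if odd.length ≠ 1 ∧ even ≠ [] then "NO" else "YES"
  else
    if odd = [] ∧ even ≠ [] then "YES" else "NO"

-- ===== PORT B =====
-- the two index-based while loops of Source B: the inner while counts the run of characters equal
-- to t[i] (= takeWhile), the outer while resumes right after the run (= dropWhile); exact
def pvRLE (t : List Char) : List Int :=
  match t with
  | [] => []
  | c :: rest =>
      (((rest.takeWhile (fun x => x == c)).length : Int) + 1)
        :: pvRLE (rest.dropWhile (fun x => x == c))
termination_by t.length
decreasing_by
  simp only [List.length_cons]
  exact Nat.lt_succ_of_le (List.dropWhile_sublist (l := rest) (p := fun x => x == c)).length_le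

def gameOfThrones_alt (s : String) : String :=
  let counts := pvRLE (PySem.List.sorted s.toList (fun c => c) false)
  let even := counts.filter (fun num => PySem.Int.mod num 2 == 0)
  let odd  := counts.filter (fun num => PySem.Int.mod num 2 != 0)
  if PySem.Str.len s % 2 ≠ 0 then
    if odd.length = 1 ∨ even = [] then "YES" else "NO"
  else
    if odd = [] ∧ even ≠ [] then "YES" else "NO"

-- ===== PRECONDITION & SPEC =====
def Spec_gameOfThrones (s : String) (out : String) : Prop := out = gameOfThrones_alt s
instance (s : String) (out : String) : Decidable (Spec_gameOfThrones s out) := by unfold Spec_gameOfThrones; infer_instance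

-- ===== CLAIM (what is proved, stated in full; the proofs are below) =====
def Claim_equal_gameOfThrones : Prop := ∀ (s : String), Dom_gameOfThrones s → Spec_gameOfThrones s (gameOfThrones s)

-- ===== LEMMAS AND PROOFS =====

-- the values list of A's counter: each distinct character's multiplicity, in first-occurrence order
theorem pv_values_counter (l : List Char) :
    (PySem.Dict.counter l).values = (PySem.Set.ofList l).map (fun k => (l.count k : Int)) := by
  show (PySem.Dict.counter l).items.map (·.2) = _
  rw [PySem.Dict.items_counter, List.map_map]
  rfl

-- run-length encoding of a sorted list is (as a multiset) the list of multiplicities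
theorem pv_rle_perm (t : List Char) (h : t.Pairwise (· ≤ ·)) :
    (pvRLE t).Perm ((PySem.Set.ofList t).map (fun c => (t.count c : Int))) := by
  induction t using pvRLE.induct with
  | case1 => simp [pvRLE]
  | case2 c rest IH =>
    set p : Char → Bool := fun x => x == c with hp
    set a := rest.takeWhile p with hadef
    set b := rest.dropWhile p with hbdef
    have hab : a ++ b = rest := List.takeWhile_append_dropWhile
    have hcle : ∀ x ∈ rest, c ≤ x := (List.pairwise_cons.mp h).1
    have hrestp : rest.Pairwise (· ≤ ·) := (List.pairwise_cons.mp h).2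
    have ha : ∀ x ∈ a, x = c := by
      intro x hx
      have hpx := List.mem_takeWhile_imp hx
      rw [hp] at hpx
      exact eq_of_beq hpx
    have hbp : b.Pairwise (· ≤ ·) := hrestp.sublist (List.dropWhile_sublist _)
    have hcb : c ∉ b := by
      cases hb : b with
      | nil => simp
      | cons x0 bs =>
        have hx0ne : x0 ≠ c := by
          have := List.head?_dropWhile_not p rest
          rw [← hbdef, hb] at this
          simp [hp] at this
          exact this
        have hx0mem : x0 ∈ rest := (List.dropWhile_sublist _).subset (by rw [← hbdef, hb]; exact List.mem_cons_self)
        have hcx0 : c ≤ x0 := hcle _ hx0mem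
        intro hc
        rcases List.mem_cons.mp hc with he | hmem
        · exact hx0ne he.symm
        · have hx0c : x0 ≤ c := by
            have := List.pairwise_cons.mp (hb ▸ hbp)
            exact this.1 _ hmem
          exact hx0ne (le_antisymm hx0c hcx0)
    have hcount_a : a.count c = a.length := List.count_eq_length.mpr (fun y hy => (ha y hy).symm)
    have hcount_b : b.count c = 0 := List.count_eq_zero.mpr hcb
    have hctc : (c :: rest).count c = a.length + 1 := by
      rw [List.count_cons_self, ← hab, List.count_append, hcount_a, hcount_b]
    have hcount_x : ∀ x ∈ b, (c :: rest).count x = b.count x := by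
      intro x hx
      have hxne : x ≠ c := fun e => hcb (e ▸ hx)
      have hca : a.count x = 0 := List.count_eq_zero.mpr (fun hxa => hxne (ha x hxa))
      rw [List.count_cons_of_ne hxne.symm, ← hab, List.count_append, hca, Nat.zero_add]
    have hnodupcons : (c :: PySem.Set.ofList b).Nodup := by
      refine List.nodup_cons.mpr ⟨?_, PySem.Set.nodup_ofList b⟩
      rw [PySem.Set.mem_ofList]; exact hcb
    have hset : (PySem.Set.ofList (c :: rest)).Perm (c :: PySem.Set.ofList b) := by
      rw [List.perm_ext_iff_of_nodup (PySem.Set.nodup_ofList _) hnodupcons]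
      intro x
      rw [PySem.Set.mem_ofList, List.mem_cons, List.mem_cons, PySem.Set.mem_ofList, ← hab,
          List.mem_append]
      constructor
      · rintro (he | hxa | hxb)
        · exact Or.inl he
        · exact Or.inl (ha x hxa)
        · exact Or.inr hxb
      · rintro (he | hxb)
        · exact Or.inl he
        · exact Or.inr (Or.inr hxb)
    have hmapb : (PySem.Set.ofList b).map (fun x => ((c :: rest).count x : Int))
        = (PySem.Set.ofList b).map (fun x => (b.count x : Int)) := by
      refine List.map_congr_left ?_
      intro x hx
      rw [hcount_x x ((PySem.Set.mem_ofList _ _).mp hx)]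
    have hstep : pvRLE (c :: rest) = ((a.length : Int) + 1) :: pvRLE b := by
      rw [pvRLE]
    rw [hstep]
    refine List.Perm.trans ?_ ((hset.map (fun x => ((c :: rest).count x : Int))).symm)
    rw [List.map_cons, hctc, hmapb]
    push_cast
    exact (IH hbp).cons _

-- B's counts are a permutation of A's counter values
theorem pv_counts_perm (l : List Char) :
    (pvRLE (PySem.List.sorted l (fun c => c) false)).Perm
      ((PySem.Dict.counter l).values) := by
  set t := PySem.List.sorted l (fun c => c) false with ht
  have hpw : t.Pairwise (· ≤ ·) := by
    have := PySem.List.sorted_pairwise l (fun c => c)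
    simpa using this
  have hperm : t.Perm l := PySem.List.sorted_perm l (fun c => c) false
  have h1 := pv_rle_perm t hpw
  have h2 : (PySem.Set.ofList t).map (fun c => (t.count c : Int))
      = (PySem.Set.ofList t).map (fun c => (l.count c : Int)) := by
    refine List.map_congr_left (fun x _ => ?_)
    rw [hperm.count_eq]
  have h3 : (PySem.Set.ofList t).Perm (PySem.Set.ofList l) := by
    rw [List.perm_ext_iff_of_nodup (PySem.Set.nodup_ofList _) (PySem.Set.nodup_ofList _)]
    intro x
    rw [PySem.Set.mem_ofList, PySem.Set.mem_ofList]
    exact hperm.mem_iff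
  rw [pv_values_counter]
  exact (h1.trans (h2 ▸ h3.map (fun c => (l.count c : Int))))

-- the shared decision logic depends only on the number of odd counts and presence of even counts
theorem pv_decision_eq (oA eA oB eB : List Int) (m : Int)
    (hol : oA.length = oB.length) (hen : eA = [] ↔ eB = []) (hon : oA = [] ↔ oB = []) :
    (if m % 2 ≠ 0 then (if oA.length ≠ 1 ∧ eA ≠ [] then "NO" else "YES")
     else (if oA = [] ∧ eA ≠ [] then "YES" else "NO"))
    = (if m % 2 ≠ 0 then (if oB.length = 1 ∨ eB = [] then "YES" else "NO")
       else (if oB = [] ∧ eB ≠ [] then "YES" else "NO")) := by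
  simp only [hol, hon]
  split_ifs <;> tauto

-- ===== VERDICT (by name: the statement is the Claim_ definition above) =====
theorem gameOfThrones_spec : Claim_equal_gameOfThrones := by
  intro s _
  unfold Spec_gameOfThrones gameOfThrones gameOfThrones_alt
  have hperm : ((PySem.Dict.counter s.toList).values).Perm
      (pvRLE (PySem.List.sorted s.toList (fun c => c) false)) := (pv_counts_perm s.toList).symm
  have hfold : (s.toList.foldl (fun d ch => d.modify ch 0 (· + 1)) PySem.Dict.empty)
      = PySem.Dict.counter s.toList := rfl
  rw [hfold]
  have hodd := hperm.filter (fun num => PySem.Int.mod num 2 != 0)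
  have heven := hperm.filter (fun num => PySem.Int.mod num 2 == 0)
  refine pv_decision_eq _ _ _ _ _ hodd.length_eq ?_ ?_
  · rw [← List.length_eq_zero_iff, ← List.length_eq_zero_iff, heven.length_eq]
  · rw [← List.length_eq_zero_iff, ← List.length_eq_zero_iff, hodd.length_eq]
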